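-- pv_equiv track=rewrite | github.com/fmidev/synop-to-bufr | separateKeysAndValues.py | areAllTheRowsSimilar
-- ===== SOURCE A (Python) =====
-- def areAllTheRowsSimilar(rows):
--     numberOfRows = len(rows)
--     different = True
--     for r in range(0,numberOfRows - 1):
--         row_a = rows[r]
--         row_b = rows[r+1]
--         if (row_a != row_b):
--             different = False
--
--     return different
-- ===== SOURCE B (Python) =====
-- def areAllTheRowsSimilar(rows):
--     if not rows:
--         return True
--     first = rows[0]
--     return all(row == first for row in rows)
-- ===== Notes on version B (the rewrite author's own statement) =====
-- stated objective: idiomatic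
-- what changed: Replaces the index-driven neighbour-by-neighbour scan with a single all() comparison of every row against the fixed first row (no indices, no flag variable).
import Mathlib
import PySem

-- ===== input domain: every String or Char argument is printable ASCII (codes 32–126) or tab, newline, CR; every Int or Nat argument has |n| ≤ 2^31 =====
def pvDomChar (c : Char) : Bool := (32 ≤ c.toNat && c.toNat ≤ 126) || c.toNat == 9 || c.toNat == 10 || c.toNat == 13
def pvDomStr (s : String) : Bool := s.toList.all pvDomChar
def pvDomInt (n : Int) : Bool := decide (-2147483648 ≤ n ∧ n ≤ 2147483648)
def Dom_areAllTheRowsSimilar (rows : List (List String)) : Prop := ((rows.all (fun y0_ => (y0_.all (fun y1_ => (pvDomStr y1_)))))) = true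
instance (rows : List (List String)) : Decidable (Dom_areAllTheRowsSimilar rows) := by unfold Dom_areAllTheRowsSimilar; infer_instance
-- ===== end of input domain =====

-- B replaces A's index-driven neighbour scan with a single all() comparison of each row
-- against the fixed first row (idiomatic; same asymptotic cost).

-- ===== PORT A =====
def areAllTheRowsSimilar (rows : List (List String)) : Bool :=
  let numberOfRows : Int := rows.length
  (PySem.List.pyRange 0 (numberOfRows - 1) 1).foldl
    (fun different r =>
      match PySem.List.pyGet? rows r, PySem.List.pyGet? rows (r + 1) with
      | some row_a, some row_b => if row_a ≠ row_b then false else different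
      | _, _ => different)   -- unreachable: both indices are always in range
    true

-- ===== PORT B =====
def areAllTheRowsSimilar_alt (rows : List (List String)) : Bool :=
  match rows with
  | [] => true
  | first :: _ => rows.all (fun row => row == first)

-- ===== PRECONDITION & SPEC =====
def Spec_areAllTheRowsSimilar (rows : List (List String)) (out : Bool) : Prop := out = areAllTheRowsSimilar_alt rows
instance (rows : List (List String)) (out : Bool) : Decidable (Spec_areAllTheRowsSimilar rows out) := by unfold Spec_areAllTheRowsSimilar; infer_instance

-- ===== CLAIM (what is proved, stated in full; the proofs are below) =====
def Claim_equal_areAllTheRowsSimilar : Prop := ∀ (rows : List (List String)), Dom_areAllTheRowsSimilar rows → Spec_areAllTheRowsSimilar rows (areAllTheRowsSimilar rows)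

-- ===== LEMMAS AND PROOFS =====

-- the body of A's loop, as a predicate on the index
def pvDiff (rows : List (List String)) (r : Int) : Bool :=
  match PySem.List.pyGet? rows r, PySem.List.pyGet? rows (r + 1) with
  | some row_a, some row_b => decide (row_a ≠ row_b)
  | _, _ => false

theorem pvStep_eq (rows : List (List String)) :
    (fun (different : Bool) (r : Int) =>
      match PySem.List.pyGet? rows r, PySem.List.pyGet? rows (r + 1) with
      | some row_a, some row_b => if row_a ≠ row_b then false else different
      | _, _ => different)
    = (fun different r => if pvDiff rows r then false else different) := by
  funext d r
  unfold pvDiff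
  rcases PySem.List.pyGet? rows r with _ | a <;> rcases PySem.List.pyGet? rows (r+1) with _ | b <;>
    simp

theorem pvFoldl_flag (g : Int → Bool) (l : List Int) (init : Bool) :
    l.foldl (fun d r => if g r then false else d) init = (init && l.all (fun r => ! g r)) := by
  induction l generalizing init with
  | nil => simp
  | cons x xs ih =>
    simp only [List.foldl_cons, List.all_cons, ih]
    cases g x <;> simp

theorem pvA_true_iff (rows : List (List String)) :
    areAllTheRowsSimilar rows = true ↔
      ∀ k : Nat, k + 1 < rows.length → rows[k]? = rows[k + 1]? := by
  unfold areAllTheRowsSimilar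
  rw [pvStep_eq, pvFoldl_flag]
  simp only [Bool.true_and, List.all_eq_true]
  constructor
  · intro h k hk
    have hm : (k : Int) ∈ PySem.List.pyRange 0 ((rows.length : Int) - 1) 1 := by
      rw [PySem.List.mem_pyRange_one]; omega
    have hthis := h _ hm
    unfold pvDiff at hthis
    rw [show ((k : Int) + 1) = ((k + 1 : Nat) : Int) by push_cast; ring] at hthis
    simp only [PySem.List.pyGet?_natCast] at hthis
    rw [List.getElem?_eq_getElem hk, List.getElem?_eq_getElem (Nat.lt_of_succ_lt hk)] at hthis ⊢
    simpa using hthis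
  · intro h r hr
    rw [PySem.List.mem_pyRange_one] at hr
    unfold pvDiff
    have hlt : r.toNat + 1 < rows.length := by omega
    have hthis := h r.toNat hlt
    rw [show r = ((r.toNat : Nat) : Int) by omega,
        show ((r.toNat : Nat) : Int) + 1 = ((r.toNat + 1 : Nat) : Int) by push_cast; ring]
    simp only [PySem.List.pyGet?_natCast]
    rw [List.getElem?_eq_getElem hlt, List.getElem?_eq_getElem (Nat.lt_of_succ_lt hlt)] at hthis
    simp_all

theorem pvChain_all (first : List String) (rest : List (List String))
    (h : ∀ k : Nat, k + 1 < (first :: rest).length → (first :: rest)[k]? = (first :: rest)[k + 1]?) :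
    ∀ k : Nat, k < (first :: rest).length → (first :: rest)[k]? = some first := by
  intro k
  induction k with
  | zero => intro _; rfl
  | succ n ih =>
    intro hk
    rw [← h n hk]
    exact ih (Nat.lt_of_succ_lt hk)

-- ===== VERDICT (by name: the statement is the Claim_ definition above) =====
theorem areAllTheRowsSimilar_spec : Claim_equal_areAllTheRowsSimilar := by
  intro rows _
  unfold Spec_areAllTheRowsSimilar
  rw [Bool.eq_iff_iff, pvA_true_iff]
  cases rows with
  | nil => simp [areAllTheRowsSimilar_alt]
  | cons first rest =>
    unfold areAllTheRowsSimilar_alt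
    simp only [List.all_eq_true, beq_iff_eq]
    constructor
    · intro h row hrow
      obtain ⟨k, hk, hget⟩ := List.getElem_of_mem hrow
      have := pvChain_all first rest h k hk
      rw [List.getElem?_eq_getElem hk] at this
      simp_all
    · intro h k hk
      have h1 : (first :: rest)[k]'(Nat.lt_of_succ_lt hk) = first :=
        h _ (List.getElem_mem _)
      have h2 : (first :: rest)[k + 1]'hk = first := h _ (List.getElem_mem _)
      rw [List.getElem?_eq_getElem hk, List.getElem?_eq_getElem (Nat.lt_of_succ_lt hk), h1, h2]
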